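-- pv_equiv track=rewrite | github.com/CLeonOS/wine | cleonos_wine_lib/runner.py | _parse_env_items
-- ===== SOURCE A (Python) =====
-- from typing import Dict, List, Optional, Tuple
--
-- def _parse_env_items(line: str, max_count: int) -> List[str]:
--     out: List[str] = []
--     i = 0
--     text = line or ""
--     length = len(text)
--
--     while i < length:
--         while i < length and text[i] in (" ", "\t", ";", "\r", "\n"):
--             i += 1
--         if i >= length:
--             break
--
--         start = i
--         while i < length and text[i] not in (";", "\r", "\n"):
--             i += 1
--         value = text[start:i].rstrip(" \t")
--         if value:
--             out.append(value)
--             if len(out) >= max_count: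
--                 break
--
--     return out
-- ===== SOURCE B (Python) =====
-- from typing import List
--
-- def _parse_env_items(line: str, max_count: int) -> List[str]:
--     out: List[str] = []
--     text = (line or "").replace("\r", ";").replace("\n", ";")
--     for seg in text.split(";"):
--         value = seg.strip(" \t")
--         if value:
--             out.append(value)
--             if len(out) >= max_count:
--                 break
--     return out
-- ===== Notes on version B (the rewrite author's own statement) =====
-- stated objective: simpler
-- what changed: Replaced the manual index-walking scanner (nested while loops with skip/take phases) by a two-phase split-then-strip decomposition: normalise CR/LF to ';', split on ';', strip each segment of spaces/tabs and collect non-empty ones.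
import Mathlib
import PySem

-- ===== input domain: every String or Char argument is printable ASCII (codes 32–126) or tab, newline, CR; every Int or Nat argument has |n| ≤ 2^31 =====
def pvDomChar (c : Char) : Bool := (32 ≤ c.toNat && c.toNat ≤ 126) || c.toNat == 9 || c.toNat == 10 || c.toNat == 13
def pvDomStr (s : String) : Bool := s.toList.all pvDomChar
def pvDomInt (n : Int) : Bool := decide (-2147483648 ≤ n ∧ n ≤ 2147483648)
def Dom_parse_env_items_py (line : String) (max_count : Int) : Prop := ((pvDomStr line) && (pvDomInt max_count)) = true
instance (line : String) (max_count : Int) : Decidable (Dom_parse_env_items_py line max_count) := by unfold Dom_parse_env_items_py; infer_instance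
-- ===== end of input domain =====

-- B replaces A's manual index-walking scanner by a split-on-delimiter then strip decomposition (same result; objective: simpler; a timing run measured B faster in Python via C-level split/strip).

-- ===== PORT A =====
-- characters skipped by A's inner skip loop: " \t;\r\n"
def pvIsSkip (c : Char) : Bool := c == ' ' || c == '\t' || c == ';' || c == '\r' || c == '\n'
-- token-ending delimiters: ";\r\n"
def pvIsDelim (c : Char) : Bool := c == ';' || c == '\r' || c == '\n'
-- the rstrip(" \t") character set
def pvIsST (c : Char) : Bool := c == ' ' || c == '\t'
-- value.rstrip(" \t") — exact hand port of str.rstrip with an explicit char set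
def pvRstripST (cs : List Char) : List Char := (cs.reverse.dropWhile pvIsST).reverse

-- the outer while loop; it is entered (and re-entered) with the skip-while already applied,
-- so the head of a non-empty argument is never a delimiter and the token scan consumes it first
def pvA_go : List Char → List String → Int → List String
  | [], out, _ => out
  | a :: t, out, mc =>
    let seg := a :: t.takeWhile (fun c => !pvIsDelim c)
    let rest := t.dropWhile (fun c => !pvIsDelim c)
    let value := pvRstripST seg
    if value.isEmpty then
      pvA_go (rest.dropWhile pvIsSkip) out mc
    else
      let out' := out ++ [String.mk value]
      if mc ≤ (out'.length : Int) then out' else pvA_go (rest.dropWhile pvIsSkip) out' mc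
termination_by cs _ _ => cs.length
decreasing_by
  all_goals
    calc ((List.dropWhile (fun c => !pvIsDelim c) t).dropWhile pvIsSkip).length
        ≤ (List.dropWhile (fun c => !pvIsDelim c) t).length := List.length_dropWhile_le _ _
      _ ≤ t.length := List.length_dropWhile_le _ _
      _ < (a :: t).length := by simp

def parse_env_items_py (line : String) (max_count : Int) : List String :=
  pvA_go (line.toList.dropWhile pvIsSkip) [] max_count

-- ===== PORT B =====
-- the strip(" \t") character set (B's own copy)
def pvIsSTB (c : Char) : Bool := c == ' ' || c == '\t'
-- seg.strip(" \t") — exact hand port of str.strip with an explicit char set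
def pvStripST (cs : List Char) : List Char := ((cs.dropWhile pvIsSTB).reverse.dropWhile pvIsSTB).reverse
-- text.replace(old, ';') for a single character old — exact for single-char patterns
def pvReplaceSemi (old : Char) (cs : List Char) : List Char :=
  cs.map (fun c => if c == old then ';' else c)
-- text.split(";") — exact hand port of str.split for a single-char separator (keeps empty pieces)
def pvSplitSemi : List Char → List (List Char)
  | [] => [[]]
  | c :: rest =>
    if c = ';' then [] :: pvSplitSemi rest
    else
      match pvSplitSemi rest with
      | [] => [[c]]
      | s :: ss => (c :: s) :: ss

def pvB_loop : List (List Char) → List String → Int → List String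
  | [], out, _ => out
  | s :: rest, out, mc =>
    let value := pvStripST s
    if value.isEmpty then pvB_loop rest out mc
    else
      let out' := out ++ [String.mk value]
      if mc ≤ (out'.length : Int) then out' else pvB_loop rest out' mc

def parse_env_items_py_alt (line : String) (max_count : Int) : List String :=
  pvB_loop (pvSplitSemi (pvReplaceSemi '\n' (pvReplaceSemi '\r' line.toList))) [] max_count

-- ===== PRECONDITION & SPEC =====
def Spec_parse_env_items_py (line : String) (max_count : Int) (out : List String) : Prop := out = parse_env_items_py_alt line max_count
instance (line : String) (max_count : Int) (out : List String) : Decidable (Spec_parse_env_items_py line max_count out) := by unfold Spec_parse_env_items_py; infer_instance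

-- ===== CLAIM (what is proved, stated in full; the proofs are below) =====
def Claim_equal_parse_env_items_py : Prop := ∀ (line : String) (max_count : Int), Dom_parse_env_items_py line max_count → Spec_parse_env_items_py line max_count (parse_env_items_py line max_count)

-- ===== LEMMAS AND PROOFS =====

def pvNorm (cs : List Char) : List Char := pvReplaceSemi '\n' (pvReplaceSemi '\r' cs)

lemma pvNorm_nil : pvNorm [] = [] := rfl

lemma pvNorm_cons (c : Char) (cs : List Char) :
    pvNorm (c :: cs) = (if c == '\r' || c == '\n' then ';' else c) :: pvNorm cs := by
  by_cases h1 : c = '\r' <;> by_cases h2 : c = '\n' <;>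
    simp_all [pvNorm, pvReplaceSemi]

lemma pvNorm_append (xs ys : List Char) : pvNorm (xs ++ ys) = pvNorm xs ++ pvNorm ys := by
  simp [pvNorm, pvReplaceSemi]

lemma pvNorm_eq_self (s : List Char) (h : ∀ x ∈ s, pvIsDelim x = false) : pvNorm s = s := by
  induction s with
  | nil => rfl
  | cons x xs ih =>
    have hx := h x (by simp)
    have h1 : x ≠ '\r' := by intro he; subst he; simp [pvIsDelim] at hx
    have h2 : x ≠ '\n' := by intro he; subst he; simp [pvIsDelim] at hx
    rw [pvNorm_cons, ih (fun y hy => h y (by simp [hy]))]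
    simp [h1, h2]

lemma splitSemi_ne_nil (xs : List Char) : pvSplitSemi xs ≠ [] := by
  cases xs with
  | nil => simp [pvSplitSemi]
  | cons c rest =>
    simp only [pvSplitSemi]
    split
    · simp
    · cases h : pvSplitSemi rest <;> simp

lemma splitSemi_semi (xs : List Char) : pvSplitSemi (';' :: xs) = [] :: pvSplitSemi xs := by
  simp [pvSplitSemi]

lemma splitSemi_cons (c : Char) (xs : List Char) (h : c ≠ ';') :
    pvSplitSemi (c :: xs) = (c :: (pvSplitSemi xs).headI) :: (pvSplitSemi xs).tail := by
  rcases hs : pvSplitSemi xs with _ | ⟨s, ss⟩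
  · exact absurd hs (splitSemi_ne_nil xs)
  · simp [pvSplitSemi, h, hs]

lemma splitSemi_cons' (c : Char) (xs s : List Char) (ss : List (List Char)) (h : c ≠ ';')
    (hs : pvSplitSemi xs = s :: ss) : pvSplitSemi (c :: xs) = (c :: s) :: ss := by
  rw [splitSemi_cons c xs h, hs]
  rfl

lemma splitSemi_append (s ys : List Char) (h : ∀ x ∈ s, x ≠ ';') :
    pvSplitSemi (s ++ ys) = (s ++ (pvSplitSemi ys).headI) :: (pvSplitSemi ys).tail := by
  induction s with
  | nil =>
    rcases hs : pvSplitSemi ys with _ | ⟨z, zs⟩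
    · exact absurd hs (splitSemi_ne_nil ys)
    · simp [hs]
  | cons c s ih =>
    have hc : c ≠ ';' := h c (by simp)
    rw [List.cons_append, splitSemi_cons c _ hc, ih (fun x hx => h x (by simp [hx]))]
    simp

lemma isSTB_eq_isST : pvIsSTB = pvIsST := rfl

lemma stripST_cons_st (c : Char) (s : List Char) (h : pvIsST c = true) :
    pvStripST (c :: s) = pvStripST s := by
  simp [pvStripST, isSTB_eq_isST, h]

lemma stripST_cons_not_st (c : Char) (s : List Char) (h : pvIsST c = false) :
    pvStripST (c :: s) = pvRstripST (c :: s) := by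
  simp [pvStripST, pvRstripST, isSTB_eq_isST, h]

lemma rstrip_cons_not_st (c : Char) (s : List Char) (h : pvIsST c = false) :
    (pvRstripST (c :: s)).isEmpty = false := by
  rw [List.isEmpty_eq_false_iff]
  intro he
  have : s.reverse ++ [c] = List.reverse (c :: s) := by simp
  have hnil : List.dropWhile pvIsST (List.reverse (c :: s)) = [] := by
    have := congrArg List.reverse he
    simpa [pvRstripST] using this
  have := (List.dropWhile_eq_nil_iff).1 hnil c (by simp)
  simp [h] at this

lemma dropWhile_head_false {α : Type} {p : α → Bool} {l : List α} {a : α} {t : List α}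
    (h : l.dropWhile p = a :: t) : p a = false := by
  induction l with
  | nil => simp at h
  | cons x xs ih =>
    by_cases hx : p x
    · rw [List.dropWhile_cons_of_pos hx] at h; exact ih h
    · rw [List.dropWhile_cons_of_neg hx] at h
      cases h
      simpa using hx

lemma delim_to_semi (c : Char) (h : pvIsDelim c = true) :
    (if c == '\r' || c == '\n' then ';' else c) = ';' := by
  simp only [pvIsDelim, Bool.or_eq_true, beq_iff_eq] at h
  rcases h with (h | h) | h <;> simp [h]

lemma pvMain : ∀ (n : Nat) (cs : List Char) (out : List String) (mc : Int), cs.length ≤ n →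
    pvA_go (cs.dropWhile pvIsSkip) out mc = pvB_loop (pvSplitSemi (pvNorm cs)) out mc := by
  intro n
  induction n with
  | zero =>
    intro cs out mc hn
    have : cs = [] := List.length_eq_zero_iff.1 (Nat.le_zero.1 hn)
    subst this
    simp [pvA_go, pvNorm_nil, pvSplitSemi, pvB_loop, pvStripST]
  | succ n ih =>
    intro cs out mc hn
    cases cs with
    | nil => simp [pvA_go, pvNorm_nil, pvSplitSemi, pvB_loop, pvStripST]
    | cons c cs' =>
      have hlen : cs'.length ≤ n := by simpa using hn
      by_cases hd : pvIsDelim c = true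
      · -- delimiter: both sides skip it
        have hsk : pvIsSkip c = true := by
          simp only [pvIsDelim, Bool.or_eq_true, beq_iff_eq] at hd
          rcases hd with (h | h) | h <;> simp [pvIsSkip, h]
        rw [pvNorm_cons, delim_to_semi c hd, splitSemi_semi]
        have : pvB_loop ([] :: pvSplitSemi (pvNorm cs')) out mc
            = pvB_loop (pvSplitSemi (pvNorm cs')) out mc := by
          simp [pvB_loop, pvStripST]
        rw [this, List.dropWhile_cons_of_pos hsk]
        exact ih cs' out mc hlen
      · by_cases hst : pvIsST c = true
        · -- space/tab: A skips it; B strips it off the first segment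
          have hsk : pvIsSkip c = true := by
            simp only [pvIsST, Bool.or_eq_true, beq_iff_eq] at hst
            rcases hst with h | h <;> simp [pvIsSkip, h]
          have hcn : c ≠ ';' := by
            intro h; subst h; simp [pvIsDelim] at hd
          have hcr : (if c == '\r' || c == '\n' then ';' else c) = c := by
            have h1 : c ≠ '\r' := by intro h; subst h; simp [pvIsDelim] at hd
            have h2 : c ≠ '\n' := by intro h; subst h; simp [pvIsDelim] at hd
            simp [h1, h2]
          rcases hs : pvSplitSemi (pvNorm cs') with _ | ⟨s, ss⟩
          · exact absurd hs (splitSemi_ne_nil _)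
          · have hB : pvB_loop ((c :: s) :: ss) out mc = pvB_loop (s :: ss) out mc := by
              simp only [pvB_loop, stripST_cons_st c s hst]
            rw [pvNorm_cons, hcr, splitSemi_cons' c _ s ss hcn hs, hB, ← hs,
              List.dropWhile_cons_of_pos hsk]
            exact ih cs' out mc hlen
        · -- start of a token
          have hsk : pvIsSkip c = false := by
            simp only [pvIsST, pvIsDelim, Bool.or_eq_true, beq_iff_eq] at hst hd
            push_neg at hst hd
            simp [pvIsSkip, hst.1, hst.2, hd.1.1, hd.1.2, hd.2]
          have hcn : c ≠ ';' := by
            intro h; subst h; simp [pvIsDelim] at hd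
          have hcr : (if c == '\r' || c == '\n' then ';' else c) = c := by
            have h1 : c ≠ '\r' := by intro h; subst h; simp [pvIsDelim] at hd
            have h2 : c ≠ '\n' := by intro h; subst h; simp [pvIsDelim] at hd
            simp [h1, h2]
          have hstF : pvIsST c = false := by simpa using hst
          set seg' := cs'.takeWhile (fun x => !pvIsDelim x) with hseg
          set rest := cs'.dropWhile (fun x => !pvIsDelim x) with hrest
          have hsplit : seg' ++ rest = cs' := List.takeWhile_append_dropWhile
          have hnoDelimSeg : ∀ x ∈ seg', pvIsDelim x = false := by
            intro x hx
            have := List.mem_takeWhile_imp (hseg ▸ hx)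
            simpa using this
          have hnoSemi : ∀ x ∈ c :: seg', x ≠ ';' := by
            intro x hx
            rcases List.mem_cons.1 hx with rfl | hx'
            · exact hcn
            · intro h; subst h
              have := hnoDelimSeg ';' hx'
              simp [pvIsDelim] at this
          have hnormSeg : pvNorm seg' = seg' := pvNorm_eq_self seg' hnoDelimSeg
          have hnormCs' : pvNorm cs' = seg' ++ pvNorm rest := by
            rw [← hsplit, pvNorm_append, hnormSeg]
          -- both sides read off the same first token
          have hLdrop : List.dropWhile pvIsSkip (c :: cs') = c :: cs' :=
            List.dropWhile_cons_of_neg (by simp [hsk])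
          have hvalEq : pvStripST (c :: seg') = pvRstripST (c :: seg') :=
            stripST_cons_not_st c seg' hstF
          have hvalNE : (pvRstripST (c :: seg')).isEmpty = false := rstrip_cons_not_st c seg' hstF
          rcases hr : rest with _ | ⟨d, rest'⟩
          · -- no delimiter follows: one final segment on each side
            have hnorm : pvNorm (c :: cs') = c :: seg' := by
              rw [pvNorm_cons, hcr, hnormCs', hr, pvNorm_nil, List.append_nil]
            have hsplitS : pvSplitSemi (c :: seg') = [c :: seg'] := by
              have := splitSemi_append (c :: seg') [] hnoSemi
              simpa [pvSplitSemi] using this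
            rw [hnorm, hsplitS, hLdrop]
            simp only [pvA_go, pvB_loop, ← hseg, ← hrest, hr, hvalEq, hvalNE, Bool.false_eq_true,
              if_false, List.dropWhile_nil]
          · -- a delimiter follows: A jumps past it, B sees the split there
            have hdD : pvIsDelim d = true := by
              have := dropWhile_head_false (hrest.symm.trans hr)
              simpa using this
            have hdSk : pvIsSkip d = true := by
              simp only [pvIsDelim, Bool.or_eq_true, beq_iff_eq] at hdD
              rcases hdD with (h | h) | h <;> simp [pvIsSkip, h]
            have hlen' : rest'.length ≤ n := by
              have h1 : rest.length ≤ cs'.length := hrest ▸ List.length_dropWhile_le _ _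
              rw [hr] at h1
              simp at h1
              omega
            have hnorm : pvNorm (c :: cs') = (c :: seg') ++ (';' :: pvNorm rest') := by
              rw [pvNorm_cons, hcr, hnormCs', hr, pvNorm_cons, delim_to_semi d hdD]
              simp
            have hsplitS : pvSplitSemi (pvNorm (c :: cs')) = (c :: seg') :: pvSplitSemi (pvNorm rest') := by
              rw [hnorm, splitSemi_append _ _ hnoSemi, splitSemi_semi]
              simp
            rw [hsplitS, hLdrop]
            simp only [pvA_go, pvB_loop, ← hseg, ← hrest, hr, hvalEq, hvalNE, Bool.false_eq_true,
              if_false]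
            split
            · rfl
            · rw [List.dropWhile_cons_of_pos hdSk]
              exact ih rest' _ mc hlen'
-- ===== VERDICT (by name: the statement is the Claim_ definition above) =====
theorem parse_env_items_py_spec : Claim_equal_parse_env_items_py := by
  intro line mc _
  unfold Spec_parse_env_items_py parse_env_items_py parse_env_items_py_alt
  have := pvMain line.toList.length line.toList [] mc (le_refl _)
  simpa [pvNorm] using this
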